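-- pv_equiv track=rewrite | github.com/solvin-ai/solvin | agentic/backend/services/tools/src/tools/tool_get_functions_by_signatures.py | extract_function_text
-- ===== SOURCE A (Python) =====
-- def extract_function_text(code, start_offset):
--     """
--     Given the full source code and a starting offset where the function declaration begins,
--     extract and return the complete function definition (signature and body).
--     Java-only helper.
--     """
--     pos_brace = code.find('{', start_offset)
--     pos_semicolon = code.find(';', start_offset)
--
--     if pos_brace == -1 or (pos_semicolon != -1 and pos_semicolon < pos_brace):
--         end_offset = pos_semicolon + 1 if pos_semicolon != -1 else len(code)
--         return code[start_offset:end_offset]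
--
--     index = pos_brace
--     count = 0
--     while index < len(code):
--         char = code[index]
--         if char == '{':
--             count += 1
--         elif char == '}':
--             count -= 1
--             if count == 0:
--                 index += 1  # include the closing brace
--                 break
--         index += 1
--
--     return code[start_offset:index]
-- ===== SOURCE B (Python) =====
-- def extract_function_text(code, start_offset):
--     """Cut the tail once, then walk it: the first ';' ends a declaration, the
--     first '{' opens a body whose end is found by recursive-descent block
--     skipping (each nested block is skipped by a recursive call)."""
--     tail = code[start_offset:]
--     for i, ch in enumerate(tail):
--         if ch == ';':
--             return tail[:i + 1]
--         if ch == '{':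
--             return tail[:_after_block(tail, i + 1)]
--     return tail
--
--
-- def _after_block(tail, j):
--     """Given that a '{' sits just before position j, return the position one
--     past its matching '}' (len(tail) if the block never closes)."""
--     while j < len(tail):
--         c = tail[j]
--         if c == '}':
--             return j + 1
--         j = _after_block(tail, j + 1) if c == '{' else j + 1
--     return j
-- ===== Notes on version B (the rewrite author's own statement) =====
-- stated objective: alternative
-- what changed: Instead of two upfront str.find calls, a positional comparison and a counter-based brace while-loop over the whole string, B slices the tail once and walks it with enumerate, ending a declaration at the first ';' and skipping a body by recursive-descent block matching (a recursive call per nested block) with no depth counter.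
import Mathlib
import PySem

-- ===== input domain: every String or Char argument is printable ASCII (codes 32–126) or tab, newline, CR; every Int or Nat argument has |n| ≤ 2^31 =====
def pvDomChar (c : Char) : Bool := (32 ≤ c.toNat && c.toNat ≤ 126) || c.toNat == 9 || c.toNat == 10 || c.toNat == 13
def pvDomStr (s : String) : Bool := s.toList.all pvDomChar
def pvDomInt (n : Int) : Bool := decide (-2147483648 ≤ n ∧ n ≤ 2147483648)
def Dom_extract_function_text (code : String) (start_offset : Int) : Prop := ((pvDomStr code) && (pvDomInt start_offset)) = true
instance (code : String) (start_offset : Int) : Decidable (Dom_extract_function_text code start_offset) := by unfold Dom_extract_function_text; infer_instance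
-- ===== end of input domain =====

-- B replaces A's two str.find calls + positional comparison + counter-based brace loop with a
-- tail slice walked by enumerate and recursive-descent block skipping (alternative decomposition,
-- no speed claim).

-- ===== PORT A =====
-- A's while-loop: brace counting from the first '{' (char fetched with pyGet?; the index is
-- always in range when the loop body runs, so the ' ' default is never used).  The loop is
-- written with a fuel argument (= number of remaining positions) purely so the recursion is
-- structural; the in-loop bounds check 'index < len' is A's own.
def pvLoopAGo (s : List Char) (fuel : Nat) (index count : Int) : Int :=
  match fuel with
  | 0 => index
  | fuel + 1 =>
    if index < (s.length : Int) then
      let char := (PySem.List.pyGet? s index).getD ' '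
      if char = '{' then pvLoopAGo s fuel (index + 1) (count + 1)
      else if char = '}' then
        if count - 1 = 0 then index + 1
        else pvLoopAGo s fuel (index + 1) (count - 1)
      else pvLoopAGo s fuel (index + 1) count
    else index

def pvLoopA (s : List Char) (index count : Int) : Int :=
  pvLoopAGo s ((s.length : Int) - index).toNat index count

def extract_function_text (code : String) (start_offset : Int) : String :=
  let pos_brace := PySem.Str.findFrom code "{" start_offset
  let pos_semicolon := PySem.Str.findFrom code ";" start_offset
  if pos_brace = -1 ∨ (pos_semicolon ≠ -1 ∧ pos_semicolon < pos_brace) then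
    let end_offset := if pos_semicolon ≠ -1 then pos_semicolon + 1 else ((PySem.Str.len code : Int))
    PySem.Str.slice code (some start_offset) (some end_offset)
  else
    PySem.Str.slice code (some start_offset) (some (pvLoopA code.toList pos_brace 0))

-- ===== PORT B =====
-- B's _after_block: the while loop written as recursion (chars via pyGet?, in range whenever the
-- loop body runs); the fuel argument (t.length + 1 at the call site, enough for the whole walk)
-- only makes the recursion structural.
def pvAfterBlock (t : List Char) : Nat → Int → Int
  | 0, j => j
  | fuel + 1, j =>
    if j < (t.length : Int) then
      let c := (PySem.List.pyGet? t j).getD ' '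
      if c = '}' then j + 1
      else if c = '{' then pvAfterBlock t fuel (pvAfterBlock t fuel (j + 1))
      else pvAfterBlock t fuel (j + 1)
    else j

-- B's 'for i, ch in enumerate(tail)' loop, as structural recursion on the remaining suffix
def pvTopGo (tail : String) (t : List Char) : List Char → Nat → String
  | [], _ => tail
  | c :: rest, i =>
    if c = ';' then PySem.Str.slice tail none (some ((i : Int) + 1))
    else if c = '{' then
      PySem.Str.slice tail none (some (pvAfterBlock t (t.length + 1) ((i : Int) + 1)))
    else pvTopGo tail t rest (i + 1)

def extract_function_text_alt (code : String) (start_offset : Int) : String :=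
  let tail := PySem.Str.slice code (some start_offset) none
  pvTopGo tail tail.toList tail.toList 0

-- ===== PRECONDITION & SPEC =====
-- (A is total: no Pre_ needed)
def Spec_extract_function_text (code : String) (start_offset : Int) (out : String) : Prop := out = extract_function_text_alt code start_offset
instance (code : String) (start_offset : Int) (out : String) : Decidable (Spec_extract_function_text code start_offset out) := by unfold Spec_extract_function_text; infer_instance

-- ===== CLAIM (what is proved, stated in full; the proofs are below) =====
def Claim_equal_extract_function_text : Prop := ∀ (code : String) (start_offset : Int), Dom_extract_function_text code start_offset → Spec_extract_function_text code start_offset (extract_function_text code start_offset)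

-- ===== LEMMAS AND PROOFS =====

-- A's loop with canonical (always-sufficient) fuel, the common reference point of both proofs
def pvLp (t : List Char) (i d : Int) : Int := pvLoopAGo t (t.length + 1) i d

lemma pv_fuel_inv (t : List Char) : ∀ (f1 : Nat) (f2 : Nat) (i d : Int),
    (t.length : Int) - i ≤ f1 → (t.length : Int) - i ≤ f2 →
    pvLoopAGo t f1 i d = pvLoopAGo t f2 i d := by
  intro f1
  induction f1 with
  | zero =>
    intro f2 i d h1 h2
    have hi : ¬ i < (t.length : Int) := by omega
    cases f2 with
    | zero => rfl
    | succ f2 => rw [pvLoopAGo, pvLoopAGo, if_neg hi]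
  | succ f1 ih =>
    intro f2 i d h1 h2
    by_cases hi : i < (t.length : Int)
    · cases f2 with
      | zero => omega
      | succ f2 =>
        rw [pvLoopAGo, pvLoopAGo, if_pos hi, if_pos hi]
        simp only []
        split_ifs <;> [exact ih f2 _ _ (by omega) (by omega);
          rfl; exact ih f2 _ _ (by omega) (by omega); exact ih f2 _ _ (by omega) (by omega)]
    · cases f2 with
      | zero => rw [pvLoopAGo, pvLoopAGo, if_neg hi]
      | succ f2 => rw [pvLoopAGo, pvLoopAGo, if_neg hi, if_neg hi]

lemma pv_loop_ge (t : List Char) : ∀ (f : Nat) (i d : Int), i ≤ pvLoopAGo t f i d := by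
  intro f
  induction f with
  | zero => intro i d; rw [pvLoopAGo]
  | succ f ih =>
    intro i d
    by_cases h : i < (t.length : Int)
    · rw [pvLoopAGo, if_pos h]
      simp only []
      split_ifs with h1 h2 h3
      · exact le_trans (by omega : i ≤ i + 1) (ih (i + 1) (d + 1))
      · omega
      · exact le_trans (by omega : i ≤ i + 1) (ih (i + 1) (d - 1))
      · exact le_trans (by omega : i ≤ i + 1) (ih (i + 1) d)
    · rw [pvLoopAGo, if_neg h]

lemma pvLp_ge (t : List Char) (i d : Int) : i ≤ pvLp t i d := pv_loop_ge t _ i d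

lemma pvLp_high (t : List Char) (i d : Int) (h : ¬ i < (t.length : Int)) : pvLp t i d = i := by
  rw [pvLp, pvLoopAGo, if_neg h]

lemma pvLp_step (t : List Char) (i d : Int) (h0 : 0 ≤ i) (h : i < (t.length : Int)) :
    pvLp t i d =
      (let c := (PySem.List.pyGet? t i).getD ' '
       if c = '{' then pvLp t (i + 1) (d + 1)
       else if c = '}' then (if d - 1 = 0 then i + 1 else pvLp t (i + 1) (d - 1))
       else pvLp t (i + 1) d) := by
  rw [pvLp, pvLoopAGo, if_pos h]
  simp only []
  split_ifs with h1 h2 h3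
  · exact pv_fuel_inv t _ _ _ _ (by omega) (by omega)
  · rfl
  · exact pv_fuel_inv t _ _ _ _ (by omega) (by omega)
  · exact pv_fuel_inv t _ _ _ _ (by omega) (by omega)

lemma pv_comp (t : List Char) : ∀ (k : Nat) (i d : Int), 0 ≤ i → 1 ≤ d →
    ((t.length : Int) - i).toNat ≤ k → pvLp t i (d + 1) = pvLp t (pvLp t i 1) d := by
  intro k
  induction k with
  | zero =>
    intro i d h0 hd hk
    have h : ¬ i < (t.length : Int) := by omega
    rw [pvLp_high t i (d + 1) h, pvLp_high t i 1 h, pvLp_high t i d h]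
  | succ k ih =>
    intro i d h0 hd hk
    by_cases h : i < (t.length : Int)
    · rw [pvLp_step t i (d + 1) h0 h, pvLp_step t i 1 h0 h]
      simp only []
      by_cases hc1 : (PySem.List.pyGet? t i).getD ' ' = '{'
      · rw [if_pos hc1, if_pos hc1]
        have hge : i + 1 ≤ pvLp t (i + 1) 1 := pvLp_ge t (i + 1) 1
        have e1 : pvLp t (i + 1) (d + 1 + 1) = pvLp t (pvLp t (i + 1) 1) (d + 1) :=
          ih (i + 1) (d + 1) (by omega) (by omega) (by omega)
        have e2 : pvLp t (pvLp t (i + 1) 1) (d + 1) = pvLp t (pvLp t (pvLp t (i + 1) 1) 1) d :=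
          ih (pvLp t (i + 1) 1) d (by omega) hd (by omega)
        have e3 : pvLp t (i + 1) (1 + 1) = pvLp t (pvLp t (i + 1) 1) 1 :=
          ih (i + 1) 1 (by omega) (by omega) (by omega)
        rw [e1, e2, ← e3]
      · rw [if_neg hc1, if_neg hc1]
        by_cases hc2 : (PySem.List.pyGet? t i).getD ' ' = '}'
        · rw [if_pos hc2, if_pos hc2, if_neg (by omega : ¬ d + 1 - 1 = 0),
            if_pos (by norm_num : (1 : Int) - 1 = 0)]
          norm_num
        · rw [if_neg hc2, if_neg hc2]
          exact ih (i + 1) d (by omega) hd (by omega)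
    · rw [pvLp_high t i (d + 1) h, pvLp_high t i 1 h, pvLp_high t i d h]

lemma pv_afterBlock_eq (t : List Char) : ∀ (fuel : Nat) (j : Int), 0 ≤ j →
    (t.length : Int) + 1 - j ≤ fuel → pvAfterBlock t fuel j = pvLp t j 1 := by
  intro fuel
  induction fuel with
  | zero =>
    intro j h0 hf
    rw [pvAfterBlock, pvLp_high t j 1 (by omega)]
  | succ fuel ih =>
    intro j h0 hf
    by_cases h : j < (t.length : Int)
    · rw [pvAfterBlock, if_pos h, pvLp_step t j 1 h0 h]
      simp only []
      by_cases h1 : (PySem.List.pyGet? t j).getD ' ' = '}'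
      · have hnb : ¬ (PySem.List.pyGet? t j).getD ' ' = '{' := by rw [h1]; decide
        rw [if_pos h1, if_neg hnb, if_pos h1, if_pos (by norm_num : (1 : Int) - 1 = 0)]
      · rw [if_neg h1]
        by_cases h2 : (PySem.List.pyGet? t j).getD ' ' = '{'
        · rw [if_pos h2, if_pos h2]
          have e1 : pvAfterBlock t fuel (j + 1) = pvLp t (j + 1) 1 :=
            ih (j + 1) (by omega) (by omega)
          have hge : j + 1 ≤ pvLp t (j + 1) 1 := pvLp_ge t (j + 1) 1
          have e2 : pvAfterBlock t fuel (pvLp t (j + 1) 1) = pvLp t (pvLp t (j + 1) 1) 1 :=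
            ih (pvLp t (j + 1) 1) (by omega) (by omega)
          rw [e1, e2,
            ← pv_comp t ((t.length : Int) - (j + 1)).toNat (j + 1) 1 (by omega) le_rfl le_rfl]
        · rw [if_neg h2, if_neg h2, if_neg h1, ih (j + 1) (by omega) (by omega)]
    · rw [pvAfterBlock, if_neg h, pvLp_high t j 1 h]

-- running A's loop on the full string from st + x is running it on the dropped tail from x
lemma pv_loop_shift (s : List Char) (st : Nat) (hst : st ≤ s.length) :
    ∀ (fuel : Nat) (x d : Int), 0 ≤ x →
      pvLoopAGo s fuel ((st : Int) + x) d = (st : Int) + pvLoopAGo (s.drop st) fuel x d := by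
  intro fuel
  induction fuel with
  | zero => intro x d h0; rw [pvLoopAGo, pvLoopAGo]
  | succ fuel ih =>
    intro x d h0
    have hlen : ((s.drop st).length : Int) = (s.length : Int) - st := by
      rw [List.length_drop]; omega
    by_cases h : x < ((s.drop st).length : Int)
    · have h' : (st : Int) + x < (s.length : Int) := by omega
      have hchar : (PySem.List.pyGet? s ((st : Int) + x)).getD ' '
          = (PySem.List.pyGet? (s.drop st) x).getD ' ' := by
        rw [PySem.List.pyGet?_of_nonneg s (by omega : (0 : Int) ≤ (st : Int) + x),
          PySem.List.pyGet?_of_nonneg (s.drop st) h0]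
        have hx : ((st : Int) + x).toNat = st + x.toNat := by omega
        rw [hx, List.getElem?_drop]
      rw [pvLoopAGo, pvLoopAGo, if_pos h, if_pos h']
      simp only [hchar]
      have harr : (st : Int) + x + 1 = (st : Int) + (x + 1) := by ring
      split_ifs
      · rw [harr, ih (x + 1) (d + 1) (by omega)]
      · omega
      · rw [harr, ih (x + 1) (d - 1) (by omega)]
      · rw [harr, ih (x + 1) d (by omega)]
    · have h' : ¬ (st : Int) + x < (s.length : Int) := by omega
      rw [pvLoopAGo, pvLoopAGo, if_neg h, if_neg h']

lemma pv_go_shift (x : Char) : ∀ (t : List Char) (k : Nat),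
    PySem.Chars.find.go [x] t k =
      (if PySem.Chars.find t [x] = -1 then -1 else PySem.Chars.find t [x] + k) := by
  intro t
  induction t with
  | nil => intro k; simp [PySem.Chars.find, PySem.Chars.find.go]
  | cons c t ih =>
    intro k
    have hnn : -1 ≤ PySem.Chars.find t [x] := PySem.Chars.neg_one_le_find t [x]
    by_cases hc : [x].isPrefixOf (c :: t) = true
    · simp [PySem.Chars.find, PySem.Chars.find.go, hc]
    · simp only [PySem.Chars.find, PySem.Chars.find.go, hc, if_neg, Bool.not_eq_true] at *
      rw [ih (k+1), ih 1]
      split_ifs with h1 h2 h2 <;> omega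

lemma pv_find_nil (x : Char) : PySem.Chars.find [] [x] = -1 := by
  simp [PySem.Chars.find, PySem.Chars.find.go]

lemma pv_find_cons_self (x : Char) (t : List Char) :
    PySem.Chars.find (x :: t) [x] = 0 := by
  simp [PySem.Chars.find, PySem.Chars.find.go, List.isPrefixOf]

lemma pv_find_cons_ne (c x : Char) (t : List Char) (h : c ≠ x) :
    PySem.Chars.find (c :: t) [x] =
      (if PySem.Chars.find t [x] = -1 then -1 else PySem.Chars.find t [x] + 1) := by
  have hp : [x].isPrefixOf (c :: t) = false := by
    simp [List.isPrefixOf]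
    intro he; exact absurd he.symm h
  rw [show PySem.Chars.find (c :: t) [x] = PySem.Chars.find.go [x] (c :: t) 0 from rfl]
  simp only [PySem.Chars.find.go, hp]
  rw [pv_go_shift]
  simp

-- a successful find points at an occurrence of the character
lemma pv_find_char (t : List Char) (c : Char) (h : PySem.Chars.find t [c] ≠ -1) :
    (PySem.Chars.find t [c]).toNat < t.length ∧
      (PySem.List.pyGet? t (PySem.Chars.find t [c])).getD ' ' = c := by
  have h0 : 0 ≤ PySem.Chars.find t [c] := by
    have := PySem.Chars.neg_one_le_find t [c]; omega
  obtain ⟨hpre, -⟩ := PySem.Chars.find_spec h0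
  obtain ⟨u, hu⟩ := hpre
  have hcons : t.drop (PySem.Chars.find t [c]).toNat = c :: u := by
    rw [← hu]; rfl
  have hlt : (PySem.Chars.find t [c]).toNat < t.length := by
    by_contra hge
    rw [List.drop_eq_nil_of_le (by omega)] at hcons
    exact List.cons_ne_nil c u hcons.symm
  refine ⟨hlt, ?_⟩
  rw [PySem.List.pyGet?_of_nonneg t h0]
  have hsome : t[(PySem.Chars.find t [c]).toNat]? = some c := by
    have h0' : (t.drop (PySem.Chars.find t [c]).toNat)[(0 : Nat)]?
        = t[(PySem.Chars.find t [c]).toNat + 0]? := List.getElem?_drop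
    rw [hcons] at h0'
    simpa using h0'.symm
  rw [hsome]; rfl

lemma pv_findFrom_clamp (s sub : List Char) (start : Int) (h : start ≤ (s.length : Int)) :
    PySem.Chars.findFrom s sub start none =
      (let st := PySem.List.clampIdx s.length start
       let r := PySem.Chars.find (s.drop st) sub
       if r = -1 then -1 else (st : Int) + r) := by
  have key : ∀ (c : Nat), (c : Nat) ≤ s.length →
      (if start < 0 then if start + (s.length : Int) < 0 then 0 else start + (s.length : Int) else start) = (c : Int) →
      (if start < 0 then if (s.length : Int) + start < 0 then 0 else ((s.length : Int) + start).toNat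
         else min start.toNat s.length) = c →
      PySem.Chars.findFrom s sub start none =
        (let st := PySem.List.clampIdx s.length start
         let r := PySem.Chars.find (s.drop st) sub
         if r = -1 then -1 else (st : Int) + r) := by
    intro c hc hA hB
    simp only [PySem.Chars.findFrom, PySem.List.clampIdx, Int.toNat_natCast, List.take_length]
    rw [hA, hB, if_neg (by omega : ¬ ((s.length : Int) < (c : Int)))]
    simp
  by_cases hneg : start < 0
  · by_cases hz : start + (s.length : Int) < 0
    · exact key 0 (by omega) (by rw [if_pos hneg, if_pos hz]; norm_num) (by rw [if_pos hneg, if_pos (by omega)])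
    · exact key (start + (s.length : Int)).toNat (by omega)
        (by rw [if_pos hneg, if_neg hz]; omega)
        (by rw [if_pos hneg, if_neg (by omega)]; omega)
  · exact key start.toNat (by omega)
      (by rw [if_neg hneg]; omega)
      (by rw [if_neg hneg]; omega)

-- B's end, expressed through the finds on the remaining suffix
def pvBEnd (tail : String) (t : List Char) (i : Nat) : String :=
  let pb := PySem.Chars.find (t.drop i) ['{']
  let ps := PySem.Chars.find (t.drop i) [';']
  if ps ≠ -1 ∧ (pb = -1 ∨ ps < pb) then PySem.Str.slice tail none (some ((i : Int) + ps + 1))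
  else if pb ≠ -1 then
    PySem.Str.slice tail none (some (pvAfterBlock t (t.length + 1) ((i : Int) + pb + 1)))
  else tail

set_option maxHeartbeats 1000000 in
lemma pv_BEnd_step (tail : String) (t : List Char) (i : Nat) (hlt : i < t.length)
    (hbrace : t[i] ≠ '{') (hsemi : t[i] ≠ ';') :
    pvBEnd tail t i = pvBEnd tail t (i + 1) := by
  have hdrop : t.drop i = t[i] :: t.drop (i + 1) := List.drop_eq_getElem_cons hlt
  have hbt : -1 ≤ PySem.Chars.find (t.drop (i + 1)) ['{'] := PySem.Chars.neg_one_le_find _ _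
  have hst : -1 ≤ PySem.Chars.find (t.drop (i + 1)) [';'] := PySem.Chars.neg_one_le_find _ _
  by_cases hb : PySem.Chars.find (t.drop (i + 1)) ['{'] = -1 <;>
    by_cases hs : PySem.Chars.find (t.drop (i + 1)) [';'] = -1
  · have h2' : PySem.Chars.find (t.drop i) ['{'] = -1 := by
      rw [hdrop, pv_find_cons_ne _ '{' _ hbrace, if_pos hb]
    have h3' : PySem.Chars.find (t.drop i) [';'] = -1 := by
      rw [hdrop, pv_find_cons_ne _ ';' _ hsemi, if_pos hs]
    simp only [pvBEnd, h2', h3']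
    split_ifs <;>
      first
        | rfl
        | (exfalso; omega)
        | (exfalso; simp_all; all_goals omega)
        | (exact congrArg (fun z => PySem.Str.slice tail none (some z)) (by push_cast; ring))
        | (exact congrArg
            (fun z => PySem.Str.slice tail none (some (pvAfterBlock t (t.length + 1) z)))
            (by push_cast; ring))
  · have h2' : PySem.Chars.find (t.drop i) ['{'] = -1 := by
      rw [hdrop, pv_find_cons_ne _ '{' _ hbrace, if_pos hb]
    have h3' : PySem.Chars.find (t.drop i) [';'] = PySem.Chars.find (t.drop (i + 1)) [';'] + 1 := by
      rw [hdrop, pv_find_cons_ne _ ';' _ hsemi, if_neg hs]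
    simp only [pvBEnd, h2', h3']
    split_ifs <;>
      first
        | rfl
        | (exfalso; omega)
        | (exfalso; simp_all; all_goals omega)
        | (exact congrArg (fun z => PySem.Str.slice tail none (some z)) (by push_cast; ring))
        | (exact congrArg
            (fun z => PySem.Str.slice tail none (some (pvAfterBlock t (t.length + 1) z)))
            (by push_cast; ring))
  · have h2' : PySem.Chars.find (t.drop i) ['{'] = PySem.Chars.find (t.drop (i + 1)) ['{'] + 1 := by
      rw [hdrop, pv_find_cons_ne _ '{' _ hbrace, if_neg hb]
    have h3' : PySem.Chars.find (t.drop i) [';'] = -1 := by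
      rw [hdrop, pv_find_cons_ne _ ';' _ hsemi, if_pos hs]
    simp only [pvBEnd, h2', h3']
    split_ifs <;>
      first
        | rfl
        | (exfalso; omega)
        | (exfalso; simp_all; all_goals omega)
        | (exact congrArg (fun z => PySem.Str.slice tail none (some z)) (by push_cast; ring))
        | (exact congrArg
            (fun z => PySem.Str.slice tail none (some (pvAfterBlock t (t.length + 1) z)))
            (by push_cast; ring))
  · have h2' : PySem.Chars.find (t.drop i) ['{'] = PySem.Chars.find (t.drop (i + 1)) ['{'] + 1 := by
      rw [hdrop, pv_find_cons_ne _ '{' _ hbrace, if_neg hb]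
    have h3' : PySem.Chars.find (t.drop i) [';'] = PySem.Chars.find (t.drop (i + 1)) [';'] + 1 := by
      rw [hdrop, pv_find_cons_ne _ ';' _ hsemi, if_neg hs]
    simp only [pvBEnd, h2', h3']
    split_ifs <;>
      first
        | rfl
        | (exfalso; omega)
        | (exfalso; simp_all; all_goals omega)
        | (exact congrArg (fun z => PySem.Str.slice tail none (some z)) (by push_cast; ring))
        | (exact congrArg
            (fun z => PySem.Str.slice tail none (some (pvAfterBlock t (t.length + 1) z)))
            (by push_cast; ring))

set_option maxHeartbeats 1000000 in
lemma pv_top_eq (tail : String) (t : List Char) : ∀ (k : Nat) (i : Nat),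
    t.length - i = k → i ≤ t.length → pvTopGo tail t (t.drop i) i = pvBEnd tail t i := by
  intro k
  induction k with
  | zero =>
    intro i hk hle
    have hi : i = t.length := by
      omega
    rw [hi, List.drop_length, pvTopGo]
    simp only [pvBEnd, List.drop_length, pv_find_nil]
    split_ifs <;> first | rfl | (exfalso; omega) | (exfalso; simp_all; all_goals omega)
  | succ k ih =>
    intro i hk hle
    have hlt : i < t.length := by omega
    have hdrop : t.drop i = t[i] :: t.drop (i + 1) := List.drop_eq_getElem_cons hlt
    rw [hdrop, pvTopGo]
    by_cases hsemi : t[i] = ';'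
    · rw [if_pos hsemi]
      have h1 : PySem.Chars.find (t.drop i) [';'] = 0 := by
        rw [hdrop, hsemi]; exact pv_find_cons_self ';' _
      have h2 : PySem.Chars.find (t.drop i) ['{'] =
          (if PySem.Chars.find (t.drop (i + 1)) ['{'] = -1 then -1
           else PySem.Chars.find (t.drop (i + 1)) ['{'] + 1) := by
        rw [hdrop, hsemi]; exact pv_find_cons_ne ';' '{' _ (by decide)
      have hbt : -1 ≤ PySem.Chars.find (t.drop (i + 1)) ['{'] := PySem.Chars.neg_one_le_find _ _
      simp only [pvBEnd, h1, h2]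
      split_ifs <;>
        first
          | rfl
          | (exfalso; omega)
          | (exfalso; simp_all; all_goals omega)
          | (exact congrArg (fun z => PySem.Str.slice tail none (some z)) (by push_cast; ring))
          | (exact congrArg
              (fun z => PySem.Str.slice tail none (some (pvAfterBlock t (t.length + 1) z)))
              (by push_cast; ring))
    · rw [if_neg hsemi]
      by_cases hbrace : t[i] = '{'
      · rw [if_pos hbrace]
        have h1 : PySem.Chars.find (t.drop i) ['{'] = 0 := by
          rw [hdrop, hbrace]; exact pv_find_cons_self '{' _
        have h2 : PySem.Chars.find (t.drop i) [';'] =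
            (if PySem.Chars.find (t.drop (i + 1)) [';'] = -1 then -1
             else PySem.Chars.find (t.drop (i + 1)) [';'] + 1) := by
          rw [hdrop, hbrace]; exact pv_find_cons_ne '{' ';' _ (by decide)
        have hst : -1 ≤ PySem.Chars.find (t.drop (i + 1)) [';'] := PySem.Chars.neg_one_le_find _ _
        simp only [pvBEnd, h1, h2]
        split_ifs <;>
          first
            | rfl
            | (exfalso; omega)
            | (exfalso; simp_all; all_goals omega)
            | (exact congrArg (fun z => PySem.Str.slice tail none (some z)) (by push_cast; ring))
            | (exact congrArg
                (fun z => PySem.Str.slice tail none (some (pvAfterBlock t (t.length + 1) z)))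
                (by push_cast; ring))
      · rw [if_neg hbrace, ih (i + 1) (by omega) (by omega),
          pv_BEnd_step tail t i hlt hbrace hsemi]

-- slicing code[a:e] for 0 ≤ e is take (e - clamped a) of the clamped-dropped tail
lemma pv_slice_abs (xs : List Char) (a e : Int) (he : 0 ≤ e) :
    PySem.List.slice xs (some a) (some e) =
      (xs.drop (PySem.List.clampIdx xs.length a)).take
        (e.toNat - PySem.List.clampIdx xs.length a) := by
  have hc : PySem.List.clampIdx xs.length e = min e.toNat xs.length := by
    simp only [PySem.List.clampIdx]
    rw [if_neg (by omega)]
  have hca : PySem.List.clampIdx xs.length a ≤ xs.length := PySem.List.clampIdx_le _ _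
  simp only [PySem.List.slice, hc]
  by_cases h : e.toNat ≤ xs.length
  · rw [min_eq_left h]
  · rw [min_eq_right (by omega)]
    rw [List.take_of_length_le (by rw [List.length_drop]),
      List.take_of_length_le (by rw [List.length_drop]; omega)]

lemma pv_main (code : String) (start_offset : Int) :
    extract_function_text code start_offset = extract_function_text_alt code start_offset := by
  apply String.toList_inj.mp
  by_cases hgt : (code.toList.length : Int) < start_offset
  · -- start past the end: both finds give -1, the tail is empty
    have hff : ∀ sub : List Char, PySem.Chars.findFrom code.toList sub start_offset none = -1 := by
      intro sub
      simp only [PySem.Chars.findFrom]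
      rw [if_pos (by omega : ((code.toList.length : Nat) : Int) < if start_offset < 0 then
        (if start_offset + (code.toList.length : Int) < 0 then 0 else start_offset + (code.toList.length : Int)) else start_offset)]
    have hclamp : PySem.List.clampIdx code.toList.length start_offset = code.toList.length := by
      simp only [PySem.List.clampIdx]
      rw [if_neg (by omega)]
      omega
    have htail : (PySem.Str.slice code (some start_offset) none).toList = [] := by
      rw [PySem.Str.toList_slice, PySem.Chars.slice_eq_listSlice, PySem.List.slice_some_none,
        hclamp, List.drop_length]
    simp only [extract_function_text_alt]
    rw [htail, pvTopGo, htail]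
    simp only [extract_function_text, PySem.Str.findFrom]
    rw [hff, hff]
    rw [if_pos (Or.inl rfl), if_neg (by omega : ¬ ((-1 : Int) ≠ -1))]
    rw [PySem.Str.toList_slice, PySem.Chars.slice_eq_listSlice,
      pv_slice_abs _ _ _ (by rw [PySem.Str.len_eq]; exact Int.natCast_nonneg _), hclamp,
      List.drop_length, List.take_nil]
  · have hle : start_offset ≤ (code.toList.length : Int) := by omega
    set st := PySem.List.clampIdx code.toList.length start_offset with hst
    have hstle : st ≤ code.toList.length := PySem.List.clampIdx_le _ _
    set t := code.toList.drop st with ht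
    have hm : (t.length : Int) = (code.toList.length : Int) - st := by
      rw [ht, List.length_drop]; omega
    have htail : (PySem.Str.slice code (some start_offset) none).toList = t := by
      rw [PySem.Str.toList_slice, PySem.Chars.slice_eq_listSlice, PySem.List.slice_some_none, ← hst]
    have hB : pvTopGo (PySem.Str.slice code (some start_offset) none) t t 0
        = pvBEnd (PySem.Str.slice code (some start_offset) none) t 0 := by
      have h := pv_top_eq (PySem.Str.slice code (some start_offset) none) t t.length 0
        (by omega) (by omega)
      rwa [List.drop_zero] at h
    simp only [extract_function_text_alt]
    rw [htail, hB]
    simp only [extract_function_text, PySem.Str.findFrom]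
    rw [show ("{" : String).toList = ['{'] from rfl, show (";" : String).toList = [';'] from rfl,
      pv_findFrom_clamp _ _ _ hle, pv_findFrom_clamp _ _ _ hle]
    simp only [pvBEnd, List.drop_zero, Nat.cast_zero, zero_add, ← hst, ← ht]
    have hbt : -1 ≤ PySem.Chars.find t ['{'] := PySem.Chars.neg_one_le_find _ _
    have hst2 : -1 ≤ PySem.Chars.find t [';'] := PySem.Chars.neg_one_le_find _ _
    by_cases hb : PySem.Chars.find t ['{'] = -1 <;> by_cases hs : PySem.Chars.find t [';'] = -1
    · -- neither a brace nor a semicolon anywhere after the start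
      rw [if_pos hb, if_pos hs, if_pos (Or.inl rfl), if_neg (by omega : ¬ ((-1 : Int) ≠ -1)),
        if_neg (fun hc => hc.1 hs), if_neg (fun hc => hc hb)]
      rw [PySem.Str.toList_slice, PySem.Chars.slice_eq_listSlice,
        pv_slice_abs _ _ _ (by rw [PySem.Str.len_eq]; exact Int.natCast_nonneg _), ← hst, ← ht,
        htail, PySem.Str.len_eq, Int.toNat_natCast]
      rw [show code.toList.length - st = t.length from by omega]
      exact List.take_length
    · -- semicolon first (no brace at all)
      rw [if_pos hb, if_neg hs, if_pos (Or.inl rfl),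
        if_pos (by omega : (st : Int) + PySem.Chars.find t [';'] ≠ -1),
        if_pos ⟨hs, Or.inl hb⟩]
      rw [PySem.Str.toList_slice, PySem.Chars.slice_eq_listSlice,
        pv_slice_abs _ _ _ (by omega), ← hst, ← ht,
        PySem.Str.toList_slice, PySem.Chars.slice_eq_listSlice,
        PySem.List.slice_to _ (by omega : (0 : Int) ≤ PySem.Chars.find t [';'] + 1), htail]
      congr 1
      omega
    · -- brace first (no semicolon at all)
      have hpb := pv_find_char t '{' hb
      rw [if_neg hb, if_pos hs,
        if_neg (by
          rintro (h1 | ⟨h1, -⟩)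
          · omega
          · exact h1 rfl),
        if_neg (fun hc => hc.1 hs), if_pos hb]
      -- A's loop from st + pb equals B's recursive block skip
      have hloop : pvLoopA code.toList ((st : Int) + PySem.Chars.find t ['{']) 0
          = (st : Int) + pvLp t (PySem.Chars.find t ['{'] + 1) 1 := by
        rw [pvLoopA, pv_loop_shift code.toList st hstle _ _ _ (by omega), ← ht,
          pv_fuel_inv t _ (t.length + 1) _ _
            (by omega) (by omega),
          show pvLoopAGo t (t.length + 1) (PySem.Chars.find t ['{']) 0
              = pvLp t (PySem.Chars.find t ['{']) 0 from rfl,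
          pvLp_step t _ 0 (by omega) (by omega)]
        simp only [hpb.2]
        simp
      have hab : pvAfterBlock t (t.length + 1) (PySem.Chars.find t ['{'] + 1)
          = pvLp t (PySem.Chars.find t ['{'] + 1) 1 :=
        pv_afterBlock_eq t (t.length + 1) _ (by omega) (by omega)
      have hge : PySem.Chars.find t ['{'] + 1 ≤ pvLp t (PySem.Chars.find t ['{'] + 1) 1 :=
        pvLp_ge t _ 1
      rw [hloop, hab,
        PySem.Str.toList_slice, PySem.Chars.slice_eq_listSlice,
        pv_slice_abs _ _ _ (by omega), ← hst, ← ht,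
        PySem.Str.toList_slice, PySem.Chars.slice_eq_listSlice,
        PySem.List.slice_to _ (by omega : (0 : Int) ≤ pvLp t (PySem.Chars.find t ['{'] + 1) 1),
        htail]
      congr 1
      omega
    · -- both present: position decides
      by_cases hba : PySem.Chars.find t [';'] < PySem.Chars.find t ['{']
      · rw [if_neg hb, if_neg hs,
          if_pos (Or.inr ⟨by omega, by omega⟩),
          if_pos (by omega : (st : Int) + PySem.Chars.find t [';'] ≠ -1),
          if_pos ⟨hs, Or.inr hba⟩]
        rw [PySem.Str.toList_slice, PySem.Chars.slice_eq_listSlice,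
          pv_slice_abs _ _ _ (by omega), ← hst, ← ht,
          PySem.Str.toList_slice, PySem.Chars.slice_eq_listSlice,
          PySem.List.slice_to _ (by omega : (0 : Int) ≤ PySem.Chars.find t [';'] + 1), htail]
        congr 1
        omega
      · have hpb := pv_find_char t '{' hb
        rw [if_neg hb, if_neg hs,
          if_neg (by intro hcon; rcases hcon with h1 | ⟨-, h1⟩ <;> omega),
          if_neg (show ¬ (PySem.Chars.find t [';'] ≠ -1 ∧ (PySem.Chars.find t ['{'] = -1 ∨
              PySem.Chars.find t [';'] < PySem.Chars.find t ['{'])) from by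
            rintro ⟨-, h1 | h1⟩
            · exact hb h1
            · exact hba h1), if_pos hb]
        have hloop : pvLoopA code.toList ((st : Int) + PySem.Chars.find t ['{']) 0
            = (st : Int) + pvLp t (PySem.Chars.find t ['{'] + 1) 1 := by
          rw [pvLoopA, pv_loop_shift code.toList st hstle _ _ _ (by omega), ← ht,
            pv_fuel_inv t _ (t.length + 1) _ _
              (by omega) (by omega),
            show pvLoopAGo t (t.length + 1) (PySem.Chars.find t ['{']) 0
                = pvLp t (PySem.Chars.find t ['{']) 0 from rfl,
            pvLp_step t _ 0 (by omega) (by omega)]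
          simp only [hpb.2]
          simp
        have hab : pvAfterBlock t (t.length + 1) (PySem.Chars.find t ['{'] + 1)
            = pvLp t (PySem.Chars.find t ['{'] + 1) 1 :=
          pv_afterBlock_eq t (t.length + 1) _ (by omega) (by omega)
        have hge : PySem.Chars.find t ['{'] + 1 ≤ pvLp t (PySem.Chars.find t ['{'] + 1) 1 :=
          pvLp_ge t _ 1
        rw [hloop, hab,
          PySem.Str.toList_slice, PySem.Chars.slice_eq_listSlice,
          pv_slice_abs _ _ _ (by omega), ← hst, ← ht,
          PySem.Str.toList_slice, PySem.Chars.slice_eq_listSlice,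
          PySem.List.slice_to _ (by omega : (0 : Int) ≤ pvLp t (PySem.Chars.find t ['{'] + 1) 1),
          htail]
        congr 1
        omega

-- ===== VERDICT (by name: the statement is the Claim_ definition above) =====
theorem extract_function_text_spec : Claim_equal_extract_function_text := by
  intro code start_offset _
  exact pv_main code start_offset
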